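-- pv_equiv track=rewrite | github.com/RodrigoPombo1/Fundamentos-de-Programacao-Playground | Py05_Strings_&_Tuples/Palindrome index.py | first_invalid_char_position
-- ===== SOURCE A (Python) =====
-- def first_invalid_char_position(length, list_string):
--     if length % 2 == 0:
--         list1 = list_string[:int(length/2)]
--         list2 = list_string[int(length/2):]
--         list2.reverse()
--         for counter, char in enumerate(list1):
--             if char != list2[counter]:
--                 character_position = counter
--                 return character_position
--         for counter, char in enumerate(list2):
--             if char != list1[counter]:
--                 character_position = length - counter - 1
--                 return character_position
--     else:
--         list1 = list_string[:int((length/2))]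
--         list2 = list_string[(int(length/2) + 1):]
--         list2.reverse()
--         for counter, char in enumerate(list1):
--             if char != list2[counter]:
--                 character_position = counter
--                 return character_position
--         for counter, char in enumerate(list2):
--             if char != list1[counter]:
--                 character_position = length - counter - 1
--                 return character_position
--     return -1
-- ===== SOURCE B (Python) =====
-- def first_invalid_char_position(length, list_string):
--     n = len(list_string)
--     for i in range(n // 2):
--         if list_string[i] != list_string[n - 1 - i]:
--             return i
--     return -1
-- ===== Notes on version B (the rewrite author's own statement) =====
-- stated objective: simpler
-- what changed: Replaced A's slice-into-halves/reverse plus two enumerate loops with a single two-pointer scan comparing list_string[i] to list_string[n-1-i] for i in range(n//2) with n = len(list_string), maintaining only the loop index.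
import Mathlib
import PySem

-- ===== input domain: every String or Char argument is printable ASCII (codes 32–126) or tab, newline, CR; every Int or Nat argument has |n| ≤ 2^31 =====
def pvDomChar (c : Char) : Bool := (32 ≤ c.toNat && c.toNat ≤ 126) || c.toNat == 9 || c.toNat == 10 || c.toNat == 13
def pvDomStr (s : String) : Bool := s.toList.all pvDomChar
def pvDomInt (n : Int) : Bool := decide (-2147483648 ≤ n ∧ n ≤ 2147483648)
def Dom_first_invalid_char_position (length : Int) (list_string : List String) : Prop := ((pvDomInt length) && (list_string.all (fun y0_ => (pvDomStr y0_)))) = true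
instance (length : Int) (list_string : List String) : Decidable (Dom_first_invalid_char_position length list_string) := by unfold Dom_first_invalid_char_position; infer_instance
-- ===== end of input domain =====

-- B replaces A's half-split/reverse machinery with a single two-pointer index scan (simpler);
-- Pre_ excludes exactly the inputs where A raises IndexError (length inconsistent with the list).

-- ===== PORT A =====
-- second loop of A: enumerate list2, index into list1; none = IndexError
def pvA_loop2 (length : Int) (l1 : List String) : List String → Nat → Option Int
  | [], _ => some (-1)
  | c :: rest, i =>
    match PySem.List.pyGet? l1 (i : Int) with
    | none => none
    | some d => if c ≠ d then some (length - (i : Int) - 1) else pvA_loop2 length l1 rest (i + 1)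

-- first loop of A: enumerate list1, index into list2; falls through to the second loop
def pvA_loop1 (length : Int) (l1 l2 : List String) : List String → Nat → Option Int
  | [], _ => pvA_loop2 length l1 l2 0
  | c :: rest, i =>
    match PySem.List.pyGet? l2 (i : Int) with
    | none => none
    | some d => if c ≠ d then some (i : Int) else pvA_loop1 length l1 l2 rest (i + 1)

def first_invalid_char_position (length : Int) (list_string : List String) : Int :=
  let h := PySem.Int.truncdiv length 2   -- int(length/2): float division then truncation; exact for |length| ≤ 2^31
  if PySem.Int.mod length 2 == 0 then
    let list1 := PySem.List.slice list_string none (some h)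
    let list2 := (PySem.List.slice list_string (some h) none).reverse
    (pvA_loop1 length list1 list2 list1 0).getD 0   -- none = IndexError, excluded by Pre_
  else
    let list1 := PySem.List.slice list_string none (some h)
    let list2 := (PySem.List.slice list_string (some (h + 1)) none).reverse
    (pvA_loop1 length list1 list2 list1 0).getD 0   -- none = IndexError, excluded by Pre_

-- ===== PORT B =====
-- B's for-loop over range(n // 2); none = IndexError (never hit: B's indices are always in range)
def pvB_go (n : Int) (xs : List String) : List Int → Option Int
  | [] => some (-1)
  | i :: rest =>
    match PySem.List.pyGet? xs i, PySem.List.pyGet? xs (n - 1 - i) with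
    | some a, some b => if a ≠ b then some i else pvB_go n xs rest
    | _, _ => none

def first_invalid_char_position_alt (length : Int) (list_string : List String) : Int :=
  let n : Int := (list_string.length : Int)
  (pvB_go n list_string (PySem.List.pyRange 0 (PySem.Int.floordiv n 2))).getD 0

-- ===== PRECONDITION & SPEC =====
-- shape numbers of A's run: x = len(list1), n - y = len(list2) (clamped slice bounds)
def pvMM (xs : List String) (j : Nat) : Bool := xs[j]? != xs[xs.length - 1 - j]?
def pvX (length : Int) (xs : List String) : Nat :=
  PySem.List.clampIdx xs.length (PySem.Int.truncdiv length 2)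
def pvY (length : Int) (xs : List String) : Nat :=
  PySem.List.clampIdx xs.length
    (if PySem.Int.mod length 2 == 0 then PySem.Int.truncdiv length 2
     else PySem.Int.truncdiv length 2 + 1)

-- Pre_ is exactly the set of inputs on which A returns (no IndexError): either A's two half
-- slices have equal length, or a mismatched pair occurs inside the compared prefix.
def Pre_first_invalid_char_position (length : Int) (list_string : List String) : Prop :=
  pvX length list_string = list_string.length - pvY length list_string ∨
  ∃ j < min (pvX length list_string) (list_string.length - pvY length list_string),
    pvMM list_string j = true
instance (length : Int) (list_string : List String) : Decidable (Pre_first_invalid_char_position length list_string) := by unfold Pre_first_invalid_char_position; infer_instance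

def pvWitness_first_invalid_char_position : Int × List String := (3, ["a", "b", "a"])

def Spec_first_invalid_char_position (length : Int) (list_string : List String) (out : Int) : Prop := out = first_invalid_char_position_alt length list_string
instance (length : Int) (list_string : List String) (out : Int) : Decidable (Spec_first_invalid_char_position length list_string out) := by unfold Spec_first_invalid_char_position; infer_instance

-- ===== CLAIM (what is proved, stated in full; the proofs are below) =====
def Claim_equal_first_invalid_char_position : Prop := ∀ (length : Int) (list_string : List String), Dom_first_invalid_char_position length list_string → Pre_first_invalid_char_position length list_string → Spec_first_invalid_char_position length list_string (first_invalid_char_position length list_string)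

-- ===== LEMMAS AND PROOFS =====

-- a mismatch position reads as inequality of the two list elements
lemma pvMM_iff (xs : List String) (j : Nat) (hj : j < xs.length) :
    pvMM xs j = true ↔ xs[j] ≠ xs[xs.length - 1 - j]'(by omega) := by
  unfold pvMM
  rw [List.getElem?_eq_getElem hj, List.getElem?_eq_getElem (by omega : xs.length - 1 - j < xs.length)]
  simp only [bne_iff_ne, ne_eq, Option.some.injEq]

-- the first (leftmost) mismatch of a symmetric scan lies in the left half
lemma pvMM_lt_half (xs : List String) (j : Nat) (hjn : j < xs.length)
    (hMM : pvMM xs j = true) (hmin : ∀ t, t < j → pvMM xs t = false) :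
    j < xs.length / 2 := by
  by_contra hge
  rcases Nat.lt_trichotomy (xs.length - 1 - j) j with hlt | heq | hgt
  · have h2 : pvMM xs (xs.length - 1 - j) = true := by
      rw [pvMM_iff _ _ (by omega)] at hMM ⊢
      have : xs.length - 1 - (xs.length - 1 - j) = j := by omega
      simp only [this]
      exact fun he => hMM he.symm
    have := hmin _ hlt
    simp [h2] at this
  · rw [pvMM_iff _ _ hjn] at hMM
    apply hMM
    congr 1
    omega
  · omega

-- A's second loop over identical lists returns -1
lemma pvA_loop2_self (L : Int) (l : List String) :
    ∀ (rem : List String) (i : Nat), rem = l.drop i → pvA_loop2 L l rem i = some (-1) := by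
  intro rem
  induction rem with
  | nil => intro i _; rfl
  | cons c rest ih =>
    intro i h
    have hi : i < l.length := by
      by_contra hge
      simp [List.drop_eq_nil_of_le (Nat.le_of_not_lt hge)] at h
    have hc : l[i] = c := by
      have := List.drop_eq_getElem_cons hi
      rw [this] at h; exact (List.cons.injEq _ _ _ _ ▸ h.symm).1
    have hrest : rest = l.drop (i + 1) := by
      have := List.drop_eq_getElem_cons hi
      rw [this] at h; exact (List.cons.injEq _ _ _ _ ▸ h.symm).2.symm
    rw [pvA_loop2, PySem.List.pyGet?_natCast, List.getElem?_eq_getElem hi, hc]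
    simp [ih (i + 1) hrest]

-- reading list2 = (xs.drop y).reverse at position i < n - y gives xs[n - 1 - i]
lemma pvL2_get (xs : List String) (y i : Nat) (hy : y ≤ xs.length) (hi : i < xs.length - y) :
    PySem.List.pyGet? ((xs.drop y).reverse) (i : Int)
      = some (xs[xs.length - 1 - i]'(by omega)) := by
  rw [PySem.List.pyGet?_natCast,
    List.getElem?_eq_getElem (by simp; omega : i < ((xs.drop y).reverse).length)]
  congr 1
  simp only [List.getElem_reverse, List.getElem_drop]
  congr 1
  have : (xs.drop y).length = xs.length - y := by simp
  omega

-- A's first loop, case "a first mismatch exists at j0": returns j0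
lemma pvA1 (L : Int) (xs : List String) (x y j0 : Nat) (hx : x ≤ xs.length) (hy : y ≤ xs.length)
    (hjx : j0 < x) (hjy : j0 < xs.length - y) (hMM : pvMM xs j0 = true)
    (hmin : ∀ t, t < j0 → pvMM xs t = false) :
    ∀ (d i : Nat), (hi : i ≤ j0) → (hd : j0 - i = d) →
    pvA_loop1 L (xs.take x) ((xs.drop y).reverse) ((xs.take x).drop i) i = some (j0 : Int) := by
  intro d
  induction d with
  | zero =>
    intro i hi hd
    have hij : i = j0 := by omega
    subst hij
    rw [List.drop_eq_getElem_cons (by simp; omega : i < (xs.take x).length), pvA_loop1,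
      pvL2_get xs y i hy (by omega)]
    rw [pvMM_iff _ _ (by omega)] at hMM
    simp only [List.getElem_take]
    rw [if_pos hMM]
  | succ d ih =>
    intro i hi hd
    have hij : i < j0 := by omega
    rw [List.drop_eq_getElem_cons (by simp; omega : i < (xs.take x).length), pvA_loop1,
      pvL2_get xs y i hy (by omega)]
    have heq : xs[i]'(by omega) = xs[xs.length - 1 - i]'(by omega) := by
      have := hmin i hij
      rw [← Bool.not_eq_true, pvMM_iff _ _ (by omega)] at this
      simpa using this
    simp only [List.getElem_take, heq, ne_eq, not_true_eq_false, ite_false]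
    exact ih (i + 1) (by omega) (by omega)

-- A's first loop, case "equal halves, no mismatch": falls through and returns -1
lemma pvA2 (L : Int) (xs : List String) (x y : Nat) (hx : x ≤ xs.length) (hy : y ≤ xs.length)
    (hxy : x = xs.length - y) (hno : ∀ t, t < x → pvMM xs t = false) :
    ∀ (d i : Nat), (hi : i ≤ x) → (hd : x - i = d) →
    pvA_loop1 L (xs.take x) ((xs.drop y).reverse) ((xs.take x).drop i) i = some (-1) := by
  intro d
  induction d with
  | zero =>
    intro i hi hd
    have hix : i = x := by omega
    subst hix
    have hnil : (List.take i xs).drop i = [] := List.drop_eq_nil_of_le (by rw [List.length_take]; omega)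
    rw [hnil, pvA_loop1]
    have heq : xs.take i = (xs.drop y).reverse := by
      apply List.ext_getElem (by simp; omega)
      intro t h1 h2
      have htx : t < i := by rw [List.length_take] at h1; omega
      have := hno t htx
      rw [← Bool.not_eq_true, pvMM_iff _ _ (by omega)] at this
      simp only [List.getElem_take, List.getElem_reverse, List.getElem_drop]
      have hlen : (xs.drop y).length = xs.length - y := by simp
      have harg : y + ((xs.drop y).length - 1 - t) = xs.length - 1 - t := by omega
      simp only [harg]
      simpa using this
    rw [← heq]
    exact pvA_loop2_self _ _ _ 0 rfl
  | succ d ih =>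
    intro i hi hd
    have hix : i < x := by omega
    rw [List.drop_eq_getElem_cons (by simp; omega : i < (xs.take x).length), pvA_loop1,
      pvL2_get xs y i hy (by omega)]
    have heq : xs[i]'(by omega) = xs[xs.length - 1 - i]'(by omega) := by
      have := hno i hix
      rw [← Bool.not_eq_true, pvMM_iff _ _ (by omega)] at this
      simpa using this
    simp only [List.getElem_take, heq, ne_eq, not_true_eq_false, ite_false]
    exact ih (i + 1) (by omega) (by omega)

-- B's scan, case "first mismatch at j0 < m": returns j0
lemma pvB2 (xs : List String) (m j0 : Nat) (hm : 2 * m ≤ xs.length) (hj : j0 < m)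
    (hMM : pvMM xs j0 = true) (hmin : ∀ t, t < j0 → pvMM xs t = false) :
    ∀ (d i : Nat), (hi : i ≤ j0) → (hd : j0 - i = d) →
    pvB_go (xs.length : Int) xs (PySem.List.pyRange (i : Int) (m : Int)) = some (j0 : Int) := by
  intro d
  induction d with
  | zero =>
    intro i hi hd
    have hij : i = j0 := by omega
    subst hij
    rw [PySem.List.pyRange_one_cons (by exact_mod_cast (by omega : i < m)), pvB_go,
      PySem.List.pyGet?_natCast, List.getElem?_eq_getElem (by omega : i < xs.length)]
    have hcast : (xs.length : Int) - 1 - (i : Int) = ((xs.length - 1 - i : Nat) : Int) := by omega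
    rw [hcast, PySem.List.pyGet?_natCast,
      List.getElem?_eq_getElem (by omega : xs.length - 1 - i < xs.length)]
    rw [pvMM_iff _ _ (by omega)] at hMM
    simp only [ne_eq, hMM, not_false_eq_true, ite_true]
  | succ d ih =>
    intro i hi hd
    have hij : i < j0 := by omega
    rw [PySem.List.pyRange_one_cons (by exact_mod_cast (by omega : i < m)), pvB_go,
      PySem.List.pyGet?_natCast, List.getElem?_eq_getElem (by omega : i < xs.length)]
    have hcast : (xs.length : Int) - 1 - (i : Int) = ((xs.length - 1 - i : Nat) : Int) := by omega
    rw [hcast, PySem.List.pyGet?_natCast,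
      List.getElem?_eq_getElem (by omega : xs.length - 1 - i < xs.length)]
    have heq : xs[i]'(by omega) = xs[xs.length - 1 - i]'(by omega) := by
      have := hmin i hij
      rw [← Bool.not_eq_true, pvMM_iff _ _ (by omega)] at this
      simpa using this
    simp only [heq, ne_eq, not_true_eq_false, ite_false]
    have : ((i : Int) + 1) = ((i + 1 : Nat) : Int) := by omega
    rw [this]
    exact ih (i + 1) (by omega) (by omega)

-- B's scan, case "no mismatch below m": returns -1
lemma pvB1 (xs : List String) (m : Nat) (hm : 2 * m ≤ xs.length)
    (hno : ∀ t, t < m → pvMM xs t = false) :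
    ∀ (d i : Nat), (hi : i ≤ m) → (hd : m - i = d) →
    pvB_go (xs.length : Int) xs (PySem.List.pyRange (i : Int) (m : Int)) = some (-1) := by
  intro d
  induction d with
  | zero =>
    intro i hi hd
    have hij : i = m := by omega
    subst hij
    rw [show PySem.List.pyRange (i : Int) (i : Int) = [] by simp [PySem.List.pyRange], pvB_go]
  | succ d ih =>
    intro i hi hd
    have hij : i < m := by omega
    rw [PySem.List.pyRange_one_cons (by exact_mod_cast hij), pvB_go,
      PySem.List.pyGet?_natCast, List.getElem?_eq_getElem (by omega : i < xs.length)]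
    have hcast : (xs.length : Int) - 1 - (i : Int) = ((xs.length - 1 - i : Nat) : Int) := by omega
    rw [hcast, PySem.List.pyGet?_natCast,
      List.getElem?_eq_getElem (by omega : xs.length - 1 - i < xs.length)]
    have heq : xs[i]'(by omega) = xs[xs.length - 1 - i]'(by omega) := by
      have := hno i hij
      rw [← Bool.not_eq_true, pvMM_iff _ _ (by omega)] at this
      simpa using this
    simp only [heq, ne_eq, not_true_eq_false, ite_false]
    have : ((i : Int) + 1) = ((i + 1 : Nat) : Int) := by omega
    rw [this]
    exact ih (i + 1) (by omega) (by omega)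

-- equal halves force x = n / 2 (clamp arithmetic; rules out the non-monotone h = -1 corner)
lemma pvHalf (length : Int) (xs : List String)
    (hxy : pvX length xs = xs.length - pvY length xs) :
    pvX length xs = xs.length / 2 := by
  unfold pvX pvY at *
  by_cases hp : (PySem.Int.mod length 2 == 0) = true
  · rw [if_pos hp] at hxy
    unfold PySem.List.clampIdx at *
    split_ifs at * <;> omega
  · rw [if_neg hp] at hxy
    unfold PySem.List.clampIdx at *
    split_ifs at * <;> omega

-- common core: A's branch body equals B, given Pre_'s shape facts
lemma pvMainGen (L : Int) (xs : List String) (x y : Nat) (hx : x ≤ xs.length) (hy : y ≤ xs.length)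
    (hP : x = xs.length - y ∨ ∃ j < min x (xs.length - y), pvMM xs j = true)
    (hhalf : x = xs.length - y → x = xs.length / 2) :
    (pvA_loop1 L (xs.take x) ((xs.drop y).reverse) (xs.take x) 0).getD 0
      = first_invalid_char_position_alt L xs := by
  have hfd : PySem.Int.floordiv ((xs.length : Nat) : Int) 2 = ((xs.length / 2 : Nat) : Int) := by
    rw [PySem.Int.floordiv_eq_ediv_of_pos (by omega)]; omega
  simp only [first_invalid_char_position_alt]
  rw [hfd]
  by_cases hex : ∃ j, j < min x (xs.length - y) ∧ pvMM xs j = true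
  · have hj0 := Nat.find_spec hex
    set j0 := Nat.find hex with hj0def
    have hmin : ∀ t, t < j0 → pvMM xs t = false := by
      intro t ht
      by_contra hb
      exact Nat.find_min hex ht ⟨by omega, by simpa using hb⟩
    have hjn : j0 < xs.length := by omega
    have hhalfj : j0 < xs.length / 2 := pvMM_lt_half xs j0 hjn hj0.2 hmin
    have hA := pvA1 L xs x y j0 hx hy (by omega) (by omega) hj0.2 hmin (j0 - 0) 0 (by omega) rfl
    rw [List.drop_zero] at hA
    have hB := pvB2 xs (xs.length / 2) j0 (by omega) hhalfj hj0.2 hmin (j0 - 0) 0 (by omega) rfl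
    rw [show ((0 : Nat) : Int) = 0 from rfl] at hB
    rw [hA, hB]
  · have hxy : x = xs.length - y := by
      rcases hP with h | ⟨j, hj, hjm⟩
      · exact h
      · exact absurd ⟨j, hj, hjm⟩ hex
    have hno : ∀ t, t < x → pvMM xs t = false := by
      intro t ht
      by_contra hb
      exact hex ⟨t, by omega, by simpa using hb⟩
    have hA := pvA2 L xs x y hx hy hxy hno (x - 0) 0 (by omega) rfl
    rw [List.drop_zero] at hA
    have hx2 := hhalf hxy
    have hB := pvB1 xs (xs.length / 2) (by omega) (by rw [← hx2]; exact hno) (xs.length / 2 - 0) 0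
      (by omega) rfl
    rw [show ((0 : Nat) : Int) = 0 from rfl] at hB
    rw [hA, hB]

-- ===== VERDICT (by name: the statement is the Claim_ definition above) =====
theorem first_invalid_char_position_spec : Claim_equal_first_invalid_char_position := by
  intro length xs _ hpre
  unfold Spec_first_invalid_char_position
  unfold Pre_first_invalid_char_position at hpre
  unfold first_invalid_char_position
  have hxle : pvX length xs ≤ xs.length := by
    unfold pvX PySem.List.clampIdx; split_ifs <;> omega
  have hyle : pvY length xs ≤ xs.length := by
    unfold pvY PySem.List.clampIdx; split_ifs <;> omega
  have hslice1 : PySem.List.slice xs none (some (PySem.Int.truncdiv length 2))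
      = xs.take (pvX length xs) := by
    unfold pvX; simp [PySem.List.slice]
  by_cases hp : (PySem.Int.mod length 2 == 0) = true
  · rw [if_pos hp]
    have hslice2 : PySem.List.slice xs (some (PySem.Int.truncdiv length 2)) none
        = xs.drop (pvY length xs) := by
      unfold pvY; rw [if_pos hp, PySem.List.slice_some_none]
    rw [hslice1, hslice2]
    exact pvMainGen length xs _ _ hxle hyle hpre (pvHalf length xs)
  · rw [if_neg hp]
    have hslice2 : PySem.List.slice xs (some (PySem.Int.truncdiv length 2 + 1)) none
        = xs.drop (pvY length xs) := by
      unfold pvY; rw [if_neg hp, PySem.List.slice_some_none]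
    rw [hslice1, hslice2]
    exact pvMainGen length xs _ _ hxle hyle hpre (pvHalf length xs)
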